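-- pv_equiv track=rewrite | github.com/luot-ai/workspace | AA/gpu/GEM5/gpgpu/trace/gpuview/V4/stage1/parser.py | compress_ticks
-- ===== SOURCE A (Python) =====
-- from typing import List, Dict
--
-- def compress_ticks(tick_list: List[int]) -> Dict[int, int]:
--     sorted_ticks = sorted(set(tick_list))
--     comp_ticks = sorted_ticks[:]
--     for i in range(len(comp_ticks) - 1):
--         gap = comp_ticks[i + 1] - comp_ticks[i]
--         if gap >= 8:
--             for j in range(i + 1, len(comp_ticks)):
--                 comp_ticks[j] -= (gap - 8)
--     return dict(zip(sorted_ticks, comp_ticks))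
-- ===== SOURCE B (Python) =====
-- def compress_ticks(tick_list):
--     # Single pass with a running cumulative offset instead of re-subtracting
--     # from all later elements at every large gap (O(n log n) vs O(n^2)).
--     s = sorted(set(tick_list))
--     if not s:
--         return {}
--     out = {s[0]: s[0]}
--     off = 0
--     prev = s[0]
--     for t in s[1:]:
--         gap = t - prev
--         if gap >= 8:
--             off += gap - 8
--         out[t] = t - off
--         prev = t
--     return out
-- ===== Notes on version B (the rewrite author's own statement) =====
-- stated objective: faster
-- what changed: Replaces the quadratic nested loop that re-subtracts the shrunken gap from every later element with a single pass over the sorted unique ticks that maintains one running cumulative offset.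
import Mathlib
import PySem

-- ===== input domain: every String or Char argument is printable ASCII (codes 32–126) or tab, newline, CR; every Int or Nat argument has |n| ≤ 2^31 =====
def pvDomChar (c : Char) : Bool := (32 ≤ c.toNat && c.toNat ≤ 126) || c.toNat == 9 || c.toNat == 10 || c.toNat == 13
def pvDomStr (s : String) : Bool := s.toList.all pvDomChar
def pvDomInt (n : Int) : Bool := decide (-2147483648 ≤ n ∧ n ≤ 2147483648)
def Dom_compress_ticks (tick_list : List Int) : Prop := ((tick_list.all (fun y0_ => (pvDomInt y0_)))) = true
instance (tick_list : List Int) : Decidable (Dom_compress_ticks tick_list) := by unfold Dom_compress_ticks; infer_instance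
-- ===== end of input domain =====

-- B replaces A's nested loop (which re-subtracts the shrunken gap from every later
-- element) by a single pass over the sorted unique ticks carrying one running
-- cumulative offset; return values are proved equal on all inputs.

-- ===== PORT A =====
-- dict(zip(sorted_ticks, comp_ticks)): the keys are the distinct sorted ticks, so the
-- insertion-order association list is exactly the zip.
def compress_ticks (tick_list : List Int) : List (Int × Int) :=
  let sorted_ticks := PySem.List.sorted (PySem.Set.ofList tick_list) (fun x => x) false
  let comp0 := sorted_ticks
  let comp :=
    (PySem.List.pyRange 0 (PySem.List.len comp0 - 1) 1).foldl
      (fun comp i =>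
        let gap := PySem.List.pyGetD comp (i + 1) 0 - PySem.List.pyGetD comp i 0
        if gap ≥ 8 then
          (PySem.List.pyRange (i + 1) (PySem.List.len comp) 1).foldl
            (fun c j => PySem.List.pySetD c j (PySem.List.pyGetD c j 0 - (gap - 8))) comp
        else comp) comp0
  sorted_ticks.zip comp

-- ===== PORT B =====
-- the 'for t in s[1:]' loop of Source B: (prev, off) is the loop state, entries in order
def ctGo (prev off : Int) : List Int → List (Int × Int)
  | [] => []
  | t :: rest =>
    let gap := t - prev
    let off' := if gap ≥ 8 then off + (gap - 8) else off
    (t, t - off') :: ctGo t off' rest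

def compress_ticks_alt (tick_list : List Int) : List (Int × Int) :=
  match PySem.List.sorted (PySem.Set.ofList tick_list) (fun x => x) false with
  | [] => []
  | t :: rest => (t, t) :: ctGo t 0 rest

-- ===== PRECONDITION & SPEC =====
def Spec_compress_ticks (tick_list : List Int) (out : List (Int × Int)) : Prop := out = compress_ticks_alt tick_list
instance (tick_list : List Int) (out : List (Int × Int)) : Decidable (Spec_compress_ticks tick_list out) := by unfold Spec_compress_ticks; infer_instance

-- ===== CLAIM (what is proved, stated in full; the proofs are below) =====
def Claim_equal_compress_ticks : Prop := ∀ (tick_list : List Int), Dom_compress_ticks tick_list → Spec_compress_ticks tick_list (compress_ticks tick_list)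

-- ===== LEMMAS AND PROOFS =====

-- amount removed from a single gap
def ctPen (g : Int) : Int := if g ≥ 8 then g - 8 else 0

-- total offset accumulated over the first k gaps of s
def ctOff (s : List Int) (k : Nat) : Int :=
  ((List.range k).map (fun i => ctPen (s.getD (i + 1) 0 - s.getD i 0))).sum

-- the common normal form both programs compute: entry k is (s[k], s[k] - ctOff s k)
def ctTarget (s : List Int) : List (Int × Int) :=
  (List.range s.length).map (fun k => (s.getD k 0, s.getD k 0 - ctOff s k))

-- A's outer-loop body, named so the fold can be talked about (defeq to the port's lambda)
def ctStepA (comp : List Int) (i : Int) : List Int :=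
  let gap := PySem.List.pyGetD comp (i + 1) 0 - PySem.List.pyGetD comp i 0
  if gap ≥ 8 then
    (PySem.List.pyRange (i + 1) (PySem.List.len comp) 1).foldl
      (fun c j => PySem.List.pySetD c j (PySem.List.pyGetD c j 0 - (gap - 8))) comp
  else comp

theorem ctOff_cons (t : Int) (rest : List Int) (k : Nat) :
    ctOff (t :: rest) (k + 1) = ctPen (rest.getD 0 0 - t) + ctOff rest k := by
  simp only [ctOff, List.range_succ_eq_map, List.map_cons, List.map_map, List.sum_cons]
  congr 1

theorem ctOff_succ (s : List Int) (i : Nat) :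
    ctOff s (i + 1) = ctOff s i + ctPen (s.getD (i + 1) 0 - s.getD i 0) := by
  simp [ctOff, List.range_succ]

theorem ctGo_eq (l : List Int) : ∀ (prev off : Int),
    ctGo prev off l =
      (List.range l.length).map
        (fun k => (l.getD k 0, l.getD k 0 - (off + ctOff (prev :: l) (k + 1)))) := by
  induction l with
  | nil => simp [ctGo]
  | cons u l' ih =>
    intro prev off
    simp only [ctGo, List.length_cons, List.range_succ_eq_map, List.map_cons, List.map_map]
    congr 1
    · rw [ctOff_cons]
      simp [ctPen, ctOff, List.getD]
      split_ifs <;> ring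
    · rw [ih u (if u - prev ≥ 8 then off + (u - prev - 8) else off)]
      apply List.map_congr_left
      intro k _
      simp only [Function.comp_apply, List.getD_cons_succ]
      congr 2
      rw [ctOff_cons prev (u :: l') (k + 1)]
      simp [ctPen, List.getD]
      split_ifs <;> ring

theorem alt_eq_target (tick_list : List Int) :
    compress_ticks_alt tick_list =
      ctTarget (PySem.List.sorted (PySem.Set.ofList tick_list) (fun x => x) false) := by
  unfold compress_ticks_alt
  cases h : PySem.List.sorted (PySem.Set.ofList tick_list) (fun x => x) false with
  | nil => simp [ctTarget]
  | cons t rest =>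
    simp only [ctTarget, List.length_cons, List.range_succ_eq_map, List.map_cons, List.map_map]
    congr 1
    · simp [ctOff]
    · rw [ctGo_eq]
      apply List.map_congr_left
      intro k _
      simp only [Function.comp_apply, List.getD_cons_succ]
      norm_num

-- A's inner loop: subtract d from every index in [a, b)
theorem inner_fold (d : Int) : ∀ (n : Nat) (a b : Int), 0 ≤ a → b - a = (n : Int) → ∀ (c : List Int),
    (((PySem.List.pyRange a b 1).foldl
        (fun c j => PySem.List.pySetD c j (PySem.List.pyGetD c j 0 - d)) c).length = c.length) ∧
    (∀ k : Nat, ((PySem.List.pyRange a b 1).foldl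
        (fun c j => PySem.List.pySetD c j (PySem.List.pyGetD c j 0 - d)) c).getD k 0 =
      if a ≤ (k : Int) ∧ (k : Int) < b ∧ k < c.length then c.getD k 0 - d else c.getD k 0) := by
  intro n
  induction n with
  | zero =>
    intro a b ha hba c
    rw [PySem.List.pyRange_one_eq_nil (by omega)]
    refine ⟨rfl, fun k => ?_⟩
    split_ifs with h
    · exfalso; omega
    · rfl
  | succ n ih =>
    intro a b ha hba c
    rw [PySem.List.pyRange_one_cons (by omega)]
    simp only [List.foldl_cons]
    have hset : PySem.List.pySetD c a (PySem.List.pyGetD c a 0 - d)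
        = c.set a.toNat (c.getD a.toNat 0 - d) := by
      rw [PySem.List.pySetD_of_nonneg c _ ha]
      congr 1
      simp [PySem.List.pyGetD, PySem.List.pyGet?_of_nonneg c ha, List.getD]
    rw [hset]
    obtain ⟨ihl, ihg⟩ := ih (a + 1) b (by omega) (by omega) (c.set a.toNat (c.getD a.toNat 0 - d))
    refine ⟨by rw [ihl, List.length_set], fun k => ?_⟩
    rw [ihg k]
    have hgd : ∀ k : Nat, (c.set a.toNat (c.getD a.toNat 0 - d)).getD k 0 =
        if k = a.toNat ∧ k < c.length then c.getD k 0 - d else c.getD k 0 := by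
      intro k
      rcases eq_or_ne a.toNat k with h1 | h1
      · subst h1
        rcases lt_or_ge a.toNat c.length with h2 | h2
        · simp [List.getD, h2]
        · simp [List.getD, not_lt.2 h2]
      · simp only [List.getD, List.getElem?_set, if_neg h1]
        rw [if_neg (fun h => h1 h.1.symm)]
    rw [hgd k]
    simp only [List.length_set]
    split_ifs with h1 h2 h2 <;> first | rfl | (exfalso; omega)

-- the outer loop after m iterations: index k carries the offset of its first min k m gaps
theorem outer_inv (s : List Int) : ∀ (m : Nat), m + 1 ≤ s.length →
    (((PySem.List.pyRange 0 (m : Int) 1).foldl ctStepA s).length = s.length) ∧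
    (∀ k : Nat, k < s.length →
      ((PySem.List.pyRange 0 (m : Int) 1).foldl ctStepA s).getD k 0
        = s.getD k 0 - ctOff s (min k m)) := by
  intro m
  induction m with
  | zero =>
    intro _
    rw [(by norm_num : ((0 : Nat) : Int) = 0), PySem.List.pyRange_one_eq_nil le_rfl]
    exact ⟨rfl, fun k _ => by simp [ctOff]⟩
  | succ m ih =>
    intro hm
    obtain ⟨ihl, ihg⟩ := ih (by omega)
    have hsplit : PySem.List.pyRange 0 ((m : Int) + 1) 1
        = PySem.List.pyRange 0 (m : Int) 1 ++ [(m : Int)] := by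
      rw [PySem.List.pyRange_one_succ_right (by omega)]
    push_cast
    rw [hsplit, List.foldl_append, List.foldl_cons, List.foldl_nil]
    set cm := (PySem.List.pyRange 0 (m : Int) 1).foldl ctStepA s with hcm
    have hg1 : PySem.List.pyGetD cm ((m : Int) + 1) 0 = s.getD (m + 1) 0 - ctOff s m := by
      have : ((m : Int) + 1) = ((m + 1 : Nat) : Int) := by push_cast; ring
      rw [this, PySem.List.pyGetD_natCast, ihg (m + 1) (by omega)]
      simp
    have hg0 : PySem.List.pyGetD cm (m : Int) 0 = s.getD m 0 - ctOff s m := by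
      rw [PySem.List.pyGetD_natCast, ihg m (by omega)]
      simp
    have hgap : PySem.List.pyGetD cm ((m : Int) + 1) 0 - PySem.List.pyGetD cm (m : Int) 0
        = s.getD (m + 1) 0 - s.getD m 0 := by rw [hg1, hg0]; ring
    unfold ctStepA
    rw [hgap]
    set g := s.getD (m + 1) 0 - s.getD m 0 with hgdef
    by_cases hbig : g ≥ 8
    · rw [if_pos hbig]
      have hlen : PySem.List.len cm = (s.length : Int) := by
        simp [PySem.List.len_eq, ihl]
      rw [hlen]
      obtain ⟨fl, fg⟩ := inner_fold (g - 8) (s.length - (m + 1)) ((m : Int) + 1) (s.length : Int)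
        (by omega) (by push_cast [Nat.cast_sub (by omega : m + 1 ≤ s.length)]; ring) cm
      refine ⟨by rw [fl, ihl], fun k hk => ?_⟩
      rw [fg k]
      rcases Nat.lt_or_ge k (m + 1) with hk1 | hk1
      · rw [if_neg (by omega), ihg k (by omega),
          min_eq_left (by omega : k ≤ m), min_eq_left (by omega : k ≤ m + 1)]
      · rw [if_pos ⟨by omega, by omega, by omega⟩, ihg k (by omega),
          min_eq_right (by omega : m ≤ k), min_eq_right (by omega : m + 1 ≤ k),
          ctOff_succ, ctPen, ← hgdef, if_pos hbig]
        ring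
    · rw [if_neg hbig]
      refine ⟨ihl, fun k hk => ?_⟩
      rw [ihg k hk]
      rcases Nat.lt_or_ge k (m + 1) with hk1 | hk1
      · rw [min_eq_left (by omega : k ≤ m), min_eq_left (by omega : k ≤ m + 1)]
      · rw [min_eq_right (by omega : m ≤ k), min_eq_right (by omega : m + 1 ≤ k),
          ctOff_succ, ctPen, ← hgdef, if_neg hbig]
        ring

theorem compress_ticks_eq_target (tick_list : List Int) :
    compress_ticks tick_list =
      ctTarget (PySem.List.sorted (PySem.Set.ofList tick_list) (fun x => x) false) := by
  show (PySem.List.sorted (PySem.Set.ofList tick_list) (fun x => x) false).zip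
      ((PySem.List.pyRange 0
          (PySem.List.len (PySem.List.sorted (PySem.Set.ofList tick_list) (fun x => x) false) - 1) 1).foldl
        ctStepA (PySem.List.sorted (PySem.Set.ofList tick_list) (fun x => x) false)) = _
  set s := PySem.List.sorted (PySem.Set.ofList tick_list) (fun x => x) false with hs
  rcases Nat.eq_zero_or_pos s.length with h0 | hpos
  · rw [List.length_eq_zero_iff] at h0
    rw [h0]
    simp [ctTarget]
  · have hlen : PySem.List.len s - 1 = ((s.length - 1 : Nat) : Int) := by
      simp [PySem.List.len_eq]
      omega
    rw [hlen]
    obtain ⟨ol, og⟩ := outer_inv s (s.length - 1) (by omega)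
    apply List.ext_getElem
    · simp [ctTarget, ol]
    · intro k hk1 hk2
      have hk : k < s.length := (by simpa using hk1 : k < s.length ∧ _).1
      rw [List.getElem_zip]
      simp only [ctTarget, List.getElem_map, List.getElem_range]
      have hcomp : ((PySem.List.pyRange 0 ((s.length - 1 : Nat) : Int) 1).foldl ctStepA s)[k]
          = s.getD k 0 - ctOff s k := by
        have := og k hk
        rw [min_eq_left (by omega)] at this
        rw [← this]
        exact (List.getD_eq_getElem _ 0 (by omega)).symm
      rw [hcomp, List.getD_eq_getElem s 0 hk]

-- ===== VERDICT (by name: the statement is the Claim_ definition above) =====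
theorem compress_ticks_spec : Claim_equal_compress_ticks := by
  intro tick_list _
  unfold Spec_compress_ticks
  rw [compress_ticks_eq_target, alt_eq_target]
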